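-- pv_equiv track=rewrite | github.com/reshinto/algo_flow | src/algorithms/heaps/construction/heapify-single-node/sources/heapify-single-node_test.py | is_path_valid
-- ===== SOURCE A (Python) =====
-- def is_path_valid(array, start_idx):
--     size = len(array)
--     parent_idx = start_idx
--     while True:
--         left_idx = 2 * parent_idx + 1
--         right_idx = 2 * parent_idx + 2
--         if left_idx >= size:
--             break
--         if array[parent_idx] > array[left_idx]:
--             return False
--         if right_idx < size and array[parent_idx] > array[right_idx]:
--             return False
--         smallest_child = right_idx if (right_idx < size and array[right_idx] < array[left_idx]) else left_idx
--         parent_idx = smallest_child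
--     return True
-- ===== SOURCE B (Python) =====
-- def is_path_valid(array, start_idx):
--     def descend(i):
--         kids = array[2 * i + 1 : 2 * i + 3]
--         if not kids:
--             return True
--         m = min(kids)
--         return array[i] <= m and descend(2 * i + 1 + kids.index(m))
--     return descend(start_idx)
-- ===== Notes on version B (the rewrite author's own statement) =====
-- stated objective: alternative
-- what changed: B replaces A's explicit left/right branching and tie-breaking with a value-driven recursion: it slices out the (1- or 2-element) child window array[2i+1:2i+3], compares the parent against min(window), and recurses at the index of the first minimum, so A's four comparisons and the smallest-child conditional disappear.
-- outside the precondition, e.g. on is_path_valid([1, 2, 3], -1): A returns False, B returns True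
import Mathlib
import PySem

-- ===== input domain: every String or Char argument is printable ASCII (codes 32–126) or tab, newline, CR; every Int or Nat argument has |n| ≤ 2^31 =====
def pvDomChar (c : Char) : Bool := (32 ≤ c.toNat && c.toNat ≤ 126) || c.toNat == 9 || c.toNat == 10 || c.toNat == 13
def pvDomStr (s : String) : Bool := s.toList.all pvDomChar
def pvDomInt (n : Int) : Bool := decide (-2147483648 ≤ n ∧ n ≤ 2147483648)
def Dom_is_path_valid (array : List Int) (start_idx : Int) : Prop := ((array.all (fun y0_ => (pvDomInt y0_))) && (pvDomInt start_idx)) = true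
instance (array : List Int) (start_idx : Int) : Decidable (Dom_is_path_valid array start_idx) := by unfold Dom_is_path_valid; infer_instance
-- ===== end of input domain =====

-- B replaces A's explicit left/right branching and tie-breaking by slicing the child
-- window array[2i+1:2i+3] and recursing at the index of its first minimum; objective:
-- alternative formulation, same cost.

-- ===== PORT A =====
-- A's 'while True' loop, transliterated with a fuel counter that merely makes it total;
-- under Pre_ (0 ≤ start_idx) the parent index strictly increases, so fuel array.length + 1
-- is never exhausted and the loop behaves exactly as Python's.
def pvLoopA (array : List Int) : Nat → Int → Bool
  | 0, _ => true
  | fuel + 1, parent_idx =>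
    let size : Int := array.length
    let left_idx := 2 * parent_idx + 1
    let right_idx := 2 * parent_idx + 2
    if left_idx ≥ size then true
    else if PySem.List.pyGetD array parent_idx 0 > PySem.List.pyGetD array left_idx 0 then false
    else if right_idx < size ∧ PySem.List.pyGetD array parent_idx 0 > PySem.List.pyGetD array right_idx 0 then false
    else
      let smallest_child :=
        if right_idx < size ∧ PySem.List.pyGetD array right_idx 0 < PySem.List.pyGetD array left_idx 0
        then right_idx else left_idx
      pvLoopA array fuel smallest_child

def is_path_valid (array : List Int) (start_idx : Int) : Bool :=
  pvLoopA array (array.length + 1) start_idx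

-- ===== PORT B =====
-- Source B's recursive helper 'descend', with the same fuel guard making it total; the
-- kids.index(m) call cannot raise (m = min(kids) ∈ kids), so '.getD 0' is exact there.
def pvDescendB (array : List Int) : Nat → Int → Bool
  | 0, _ => true
  | fuel + 1, i =>
    let kids := PySem.List.slice array (some (2 * i + 1)) (some (2 * i + 3))
    match PySem.List.min? kids (fun x => x) with
    | none => true
    | some m =>
      decide (PySem.List.pyGetD array i 0 ≤ m) &&
        pvDescendB array fuel (2 * i + 1 + ((PySem.List.index? kids m).getD 0 : Nat))

def is_path_valid_alt (array : List Int) (start_idx : Int) : Bool :=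
  pvDescendB array (array.length + 1) start_idx

-- ===== PRECONDITION & SPEC =====
-- Pre_ excludes negative start_idx: there Python's negative-index wraparound makes A's
-- result accidental, and A can raise IndexError or loop forever.
def Pre_is_path_valid (array : List Int) (start_idx : Int) : Prop := 0 ≤ start_idx
instance (array : List Int) (start_idx : Int) : Decidable (Pre_is_path_valid array start_idx) := by unfold Pre_is_path_valid; infer_instance

def pvWitness_is_path_valid : List Int × Int := ([1, 2, 3], 0)

def Spec_is_path_valid (array : List Int) (start_idx : Int) (out : Bool) : Prop := out = is_path_valid_alt array start_idx
instance (array : List Int) (start_idx : Int) (out : Bool) : Decidable (Spec_is_path_valid array start_idx out) := by unfold Spec_is_path_valid; infer_instance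

-- ===== CLAIM =====
def Claim_equal_is_path_valid : Prop := ∀ (array : List Int) (start_idx : Int), Dom_is_path_valid array start_idx → Pre_is_path_valid array start_idx → Spec_is_path_valid array start_idx (is_path_valid array start_idx)

-- ===== LEMMAS AND PROOFS =====

theorem pvLoopA_eq_descend (array : List Int) :
    ∀ (fuel : Nat) (p : Int), 0 ≤ p →
      pvLoopA array fuel p = pvDescendB array fuel p := by
  intro fuel
  induction fuel with
  | zero => intro p _; rfl
  | succ f ih =>
    intro p hp
    simp only [pvLoopA, pvDescendB]
    by_cases hl : 2 * p + 1 < (array.length : Int)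
    · -- left child exists
      have hkids : PySem.List.slice array (some (2 * p + 1)) (some (2 * p + 3)) =
          (array.drop (2 * p + 1).toNat).take 2 := by
        rw [PySem.List.slice_toNat array (by omega) (by omega)]
        congr 1; omega
      have hlen : (2 * p + 1).toNat < array.length := by omega
      have hdrop := List.drop_eq_getElem_cons hlen
      by_cases hr : 2 * p + 2 < (array.length : Int)
      · -- two children
        have hlen2 : (2 * p + 1).toNat + 1 < array.length := by omega
        have hdrop2 := List.drop_eq_getElem_cons hlen2
        set l := array[(2 * p + 1).toNat] with hldef
        set r := array[(2 * p + 1).toNat + 1] with hrdef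
        have hkids2 : PySem.List.slice array (some (2 * p + 1)) (some (2 * p + 3)) = [l, r] := by
          rw [hkids, hdrop, List.take_succ_cons, hdrop2, List.take_succ_cons, List.take_zero]
        have hgl : PySem.List.pyGetD array (2 * p + 1) 0 = l := by
          rw [PySem.List.pyGetD_eq_getElem array 0 (by omega) hl]
        have hgr : PySem.List.pyGetD array (2 * p + 2) 0 = r := by
          rw [PySem.List.pyGetD_eq_getElem array 0 (by omega) hr]
          congr 1; omega
        have hmin : PySem.List.min? ([l, r] : List Int) (fun x => x) = some (min l r) := by
          rw [PySem.List.min?_id_cons]; simp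
        rw [hkids2, hmin]
        simp only [not_le.mpr hl, if_false, hgl, hgr]
        by_cases hrl : r < l
        · have hidx : PySem.List.index? ([l, r] : List Int) (min l r) = some 1 := by
            have : min l r = r := by omega
            rw [this, PySem.List.index?_cons_of_ne [r] (by omega),
              PySem.List.index?_cons_self]; rfl
          by_cases h1 : PySem.List.pyGetD array p 0 > l
          · have hb : ¬ PySem.List.pyGetD array p 0 ≤ min l r := by omega
            simp [h1, hb]
          · by_cases h2 : PySem.List.pyGetD array p 0 > r
            · have hb : ¬ PySem.List.pyGetD array p 0 ≤ min l r := by omega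
              simp [h1, h2, hr, hb]
            · have hb : PySem.List.pyGetD array p 0 ≤ min l r := by omega
              simp only [hidx, Option.getD_some, Nat.cast_one, h1, h2, hr, hrl,
                true_and, and_true, if_false, if_true, hb, decide_true, Bool.true_and]
              have harg : 2 * p + 1 + (1 : Int) = 2 * p + 2 := by ring
              rw [harg]
              exact ih _ (by omega)
        · have hidx : PySem.List.index? ([l, r] : List Int) (min l r) = some 0 := by
            have : min l r = l := by omega
            rw [this]; exact PySem.List.index?_cons_self l [r]
          by_cases h1 : PySem.List.pyGetD array p 0 > l
          · have hb : ¬ PySem.List.pyGetD array p 0 ≤ min l r := by omega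
            simp [h1, hb]
          · by_cases h2 : PySem.List.pyGetD array p 0 > r
            · have hb : ¬ PySem.List.pyGetD array p 0 ≤ min l r := by omega
              simp [h1, h2, hr, hb]
            · have hb : PySem.List.pyGetD array p 0 ≤ min l r := by omega
              simp only [hidx, Option.getD_some, Nat.cast_zero, add_zero, h1, h2, hr, hrl,
                and_false, if_false, hb, decide_true,
                Bool.true_and]
              exact ih _ (by omega)
      · -- only the left child
        set l := array[(2 * p + 1).toNat] with hldef
        have hkids1 : PySem.List.slice array (some (2 * p + 1)) (some (2 * p + 3)) = [l] := by
          rw [hkids, hdrop]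
          have h0 : array.drop ((2 * p + 1).toNat + 1) = [] := by
            apply List.drop_eq_nil_of_le; omega
          rw [h0, List.take_succ_cons, List.take_nil]
        have hgl : PySem.List.pyGetD array (2 * p + 1) 0 = l := by
          rw [PySem.List.pyGetD_eq_getElem array 0 (by omega) hl]
        have hmin : PySem.List.min? ([l] : List Int) (fun x => x) = some l := by
          rw [PySem.List.min?_id_cons]; rfl
        have hidx : PySem.List.index? ([l] : List Int) l = some 0 :=
          PySem.List.index?_cons_self l []
        rw [hkids1, hmin]
        simp only [not_le.mpr hl, if_false, hgl, hr, false_and, if_false,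
          hidx, Option.getD_some, Nat.cast_zero, add_zero]
        by_cases h1 : PySem.List.pyGetD array p 0 > l
        · simp [h1]
        · have hb : PySem.List.pyGetD array p 0 ≤ l := by omega
          simp only [h1, if_false, hb, decide_true, Bool.true_and]
          exact ih _ (by omega)
    · -- no children: both sides return true
      have hkids : PySem.List.slice array (some (2 * p + 1)) (some (2 * p + 3)) = ([] : List Int) := by
        rw [PySem.List.slice_toNat array (by omega) (by omega)]
        have h0 : array.drop (2 * p + 1).toNat = [] := by
          apply List.drop_eq_nil_of_le; omega
        rw [h0, List.take_nil]
      rw [hkids]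
      simp [not_lt.mp hl, PySem.List.min?]

-- ===== VERDICT =====
theorem is_path_valid_spec : Claim_equal_is_path_valid := by
  intro array start_idx _ hpre
  unfold Spec_is_path_valid is_path_valid is_path_valid_alt
  exact pvLoopA_eq_descend array (array.length + 1) start_idx hpre
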